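-- pv_equiv track=rewrite | github.com/woongjichoi/Programmers-Algorithm | Python/n^2 배열 자르기.py | solution
-- ===== SOURCE A (Python) =====
-- def solution(n, left, right):
--     def findNumber(i,j): # 2차원 배열 인덱스가 주어졌을 때 숫자 구하는 함수
--         # 규칙을 너무 어렵게 생각함 i=0, j=0, i=n-1, j=n-1, 그 외
--         # 이렇게 나누어 생각했는데 그냥 i,j 둘 중 큰 값 따라가는 것이었음
--         return max(i,j)+1
--
--     answer=[]
--     for i in range(int(left), int(right)+1): # 왜 int 씌우는지 모름
--         a=i//n
--         b=i%n
--         answer.append(findNumber(a,b))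
--     return answer
-- ===== SOURCE B (Python) =====
-- def solution(n, left, right):
--     left, right = int(left), int(right)
--     if right < left:
--         return []
--     r0, r1 = left // n, right // n
--     answer = []
--     for r in range(r0, r1 + 1):
--         c_lo = left % n if r == r0 else 0
--         c_hi = right % n if r == r1 else n - 1
--         for c in range(c_lo, c_hi + 1):
--             answer.append(max(r, c) + 1)
--     return answer
-- ===== Notes on version B (the rewrite author's own statement) =====
-- stated objective: alternative
-- what changed: B replaces A's single flat loop that recomputes i//n and i%n for every index with a row-by-row nested pass: it computes the first and last row once and iterates rows, clipping the column range on the first and last row, appending max(r,c)+1.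
-- outside the precondition, e.g. on solution(-2, 0, 3): A returns [1, 0, 1, 0], B returns []; on solution(0, 0, 3): A raises ZeroDivisionError, B raises ZeroDivisionError
import Mathlib
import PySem

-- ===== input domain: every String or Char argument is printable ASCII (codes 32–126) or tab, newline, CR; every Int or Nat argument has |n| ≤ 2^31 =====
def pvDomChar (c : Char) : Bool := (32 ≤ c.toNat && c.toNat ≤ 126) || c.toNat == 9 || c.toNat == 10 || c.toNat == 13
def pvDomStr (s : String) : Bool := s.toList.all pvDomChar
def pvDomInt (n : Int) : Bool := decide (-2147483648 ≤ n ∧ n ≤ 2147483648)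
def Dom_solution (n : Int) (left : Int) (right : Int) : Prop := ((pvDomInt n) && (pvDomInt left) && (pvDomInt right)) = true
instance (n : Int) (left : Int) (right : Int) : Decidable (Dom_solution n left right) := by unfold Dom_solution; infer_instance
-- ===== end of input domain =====

-- B replaces A's single flat loop (which recomputes i//n and i%n at every index) by a
-- row-by-row nested pass over the n×n grid, clipping the column range on the first and
-- last row; same cost, different decomposition (objective: alternative).

-- ===== PORT A =====
def findNumber (i : Int) (j : Int) : Int := max i j + 1

def solution (n : Int) (left : Int) (right : Int) : List Int :=
  (PySem.List.pyRange left (right + 1) 1).foldl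
    (fun answer i =>
      let a := PySem.Int.floordiv i n
      let b := PySem.Int.mod i n
      answer ++ [findNumber a b]) []

-- ===== PORT B =====
def solution_alt (n : Int) (left : Int) (right : Int) : List Int :=
  if right < left then []
  else
    let r0 := PySem.Int.floordiv left n
    let r1 := PySem.Int.floordiv right n
    (PySem.List.pyRange r0 (r1 + 1) 1).foldl
      (fun answer r =>
        let cLo := if r = r0 then PySem.Int.mod left n else 0
        let cHi := if r = r1 then PySem.Int.mod right n else n - 1
        (PySem.List.pyRange cLo (cHi + 1) 1).foldl
          (fun ans c => ans ++ [max r c + 1]) answer)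
      []

-- ===== PRECONDITION & SPEC =====
-- Pre_ restricts to the natural domain of the task, n ≥ 1 (n is the side of an n×n grid),
-- except that an empty index range (right < left) is allowed for any n since no division
-- happens: it excludes n = 0 with left ≤ right, where both A and B raise ZeroDivisionError,
-- and n ≤ -1 with left ≤ right, outside the natural domain, where B's row decomposition
-- (which assumes a positive row width) does not reproduce A's values.
def Pre_solution (n : Int) (left : Int) (right : Int) : Prop := 1 ≤ n ∨ right < left
instance (n : Int) (left : Int) (right : Int) : Decidable (Pre_solution n left right) := by unfold Pre_solution; infer_instance
def pvWitness_solution : Int × Int × Int := (3, 2, 5)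

def Spec_solution (n : Int) (left : Int) (right : Int) (out : List Int) : Prop := out = solution_alt n left right
instance (n : Int) (left : Int) (right : Int) (out : List Int) : Decidable (Spec_solution n left right out) := by unfold Spec_solution; infer_instance

-- ===== CLAIM (what is proved, stated in full; the proofs are below) =====
def Claim_equal_solution : Prop := ∀ (n : Int) (left : Int) (right : Int), Dom_solution n left right → Pre_solution n left right → Spec_solution n left right (solution n left right)

-- ===== LEMMAS AND PROOFS =====

-- One full or clipped row: flat indices n*q+a … n*q+b-1 (0 ≤ a, b ≤ n) all lie in row q,
-- and their values are max(q, column)+1.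
theorem pv_rowmap (n q a b : Int) (hn : 0 < n) (ha : 0 ≤ a) (hb : b ≤ n) :
    (PySem.List.pyRange (n * q + a) (n * q + b) 1).map (fun i => max (i / n) (i % n) + 1)
      = (PySem.List.pyRange a b 1).map (fun c => max q c + 1) := by
  rw [PySem.List.pyRange_one (n * q + a), PySem.List.pyRange_one a]
  have hlen : (n * q + b - (n * q + a)) = b - a := by ring
  rw [hlen]
  simp only [List.map_map]
  apply List.map_congr_left
  intro k hk
  have hk' : (k : Int) < b - a := by
    have h := List.mem_range.mp hk
    omega
  have hc0 : 0 ≤ a + (k : Int) := by omega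
  have hcn : a + (k : Int) < n := by omega
  have h1 : (n * q + a + (k : Int)) / n = q := by
    rw [show n * q + a + (k : Int) = (a + (k : Int)) + q * n by ring,
        Int.add_mul_ediv_right _ _ (ne_of_gt hn),
        Int.ediv_eq_zero_of_lt hc0 hcn, zero_add]
  have h2 : (n * q + a + (k : Int)) % n = a + (k : Int) := by
    rw [show n * q + a + (k : Int) = (a + (k : Int)) + n * q by ring,
        Int.add_mul_emod_self_left]
    exact Int.emod_eq_of_lt hc0 hcn
  simp only [Function.comp_apply, h1, h2]

-- The flat slice left…right equals the concatenation of its rows, clipped at both ends.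
theorem pv_rowsEq (n r : Int) (hn : 0 < n) :
    ∀ (k : Nat) (l : Int), l ≤ r → (r / n - l / n).toNat = k →
    (PySem.List.pyRange l (r + 1) 1).map (fun i => max (i / n) (i % n) + 1)
      = (PySem.List.pyRange (l / n) (r / n + 1) 1).flatMap
          (fun q => (PySem.List.pyRange (if q = l / n then l % n else 0)
              ((if q = r / n then r % n else n - 1) + 1) 1).map (fun c => max q c + 1)) := by
  intro k
  induction k with
  | zero =>
    intro l hlr h0
    have hle : l / n ≤ r / n := Int.ediv_le_ediv hn hlr
    have hq : l / n = r / n := by omega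
    rw [← hq, PySem.List.pyRange_one_singleton]
    simp only [List.flatMap_cons, List.flatMap_nil, List.append_nil]
    have h1 : n * (l / n) + l % n = l := Int.ediv_add_emod l n
    have h2 : n * (l / n) + (r % n + 1) = r + 1 := by
      have := Int.ediv_add_emod r n
      rw [hq]; omega
    calc (PySem.List.pyRange l (r + 1) 1).map (fun i => max (i / n) (i % n) + 1)
        = (PySem.List.pyRange (n * (l / n) + l % n) (n * (l / n) + (r % n + 1)) 1).map
            (fun i => max (i / n) (i % n) + 1) := by rw [h1, h2]
      _ = (PySem.List.pyRange (l % n) (r % n + 1) 1).map (fun c => max (l / n) c + 1) := by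
            exact pv_rowmap n (l / n) (l % n) (r % n + 1) hn
              (Int.emod_nonneg l (ne_of_gt hn))
              (by have := Int.emod_lt_of_pos r hn; omega)
  | succ k ih =>
    intro l hlr hk
    have h01 : l / n < r / n := by omega
    have hlm : l < n * (l / n + 1) := by
      have h := Int.lt_ediv_add_one_mul_self l hn
      calc l < (l / n + 1) * n := h
        _ = n * (l / n + 1) := by ring
    have hmr : n * (l / n + 1) ≤ r := by
      have h := (Int.le_ediv_iff_mul_le hn).mp (by omega : l / n + 1 ≤ r / n)
      calc n * (l / n + 1) = (l / n + 1) * n := by ring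
        _ ≤ r := h
    have hmdiv : n * (l / n + 1) / n = l / n + 1 := Int.mul_ediv_cancel_left _ (ne_of_gt hn)
    have hmmod : n * (l / n + 1) % n = 0 := Int.mul_emod_right n _
    rw [PySem.List.pyRange_one_append l (n * (l / n + 1)) (r + 1) (le_of_lt hlm) (by omega),
        List.map_append]
    rw [PySem.List.pyRange_one_cons (show l / n < r / n + 1 by omega), List.flatMap_cons]
    congr 1
    · -- first (clipped) row
      rw [if_pos rfl, if_neg (by omega : ¬ l / n = r / n)]
      have h1 : n * (l / n) + l % n = l := Int.ediv_add_emod l n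
      have h2 : n * (l / n) + (n - 1 + 1) = n * (l / n + 1) := by ring
      calc (PySem.List.pyRange l (n * (l / n + 1)) 1).map (fun i => max (i / n) (i % n) + 1)
          = (PySem.List.pyRange (n * (l / n) + l % n) (n * (l / n) + (n - 1 + 1)) 1).map
              (fun i => max (i / n) (i % n) + 1) := by rw [h1, h2]
        _ = (PySem.List.pyRange (l % n) (n - 1 + 1) 1).map (fun c => max (l / n) c + 1) := by
              exact pv_rowmap n (l / n) (l % n) (n - 1 + 1) hn
                (Int.emod_nonneg l (ne_of_gt hn)) (by omega)
    · -- remaining rows, via the induction hypothesis at l' = n*(l/n+1)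
      rw [ih (n * (l / n + 1)) hmr (by rw [hmdiv]; omega), hmdiv]
      apply List.flatMap_congr
      intro q hq
      have hql : l / n + 1 ≤ q := (PySem.List.mem_pyRange_one.mp hq).1
      simp only [hmmod, ite_self, if_neg (show ¬ q = l / n by omega)]

-- ===== VERDICT (by name: the statement is the Claim_ definition above) =====
theorem solution_spec : Claim_equal_solution := by
  intro n left right _ hpre
  unfold Spec_solution solution solution_alt findNumber
  by_cases h : right < left
  · rw [if_pos h, PySem.List.pyRange_one_eq_nil (by omega : right + 1 ≤ left)]
    rfl
  · have hn : 0 < n := by rcases hpre with hp | hp; omega; omega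
    simp only [PySem.Int.floordiv_eq_ediv_of_pos hn, PySem.Int.mod_eq_emod_of_pos hn]
    rw [if_neg h]
    simp only [PySem.List.foldl_append_singleton_eq_map, List.nil_append,
      PySem.List.foldl_append_eq_flatMap]
    exact pv_rowsEq n right hn (right / n - left / n).toNat left (by omega) rfl
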